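-- pv_equiv track=rewrite | github.com/Ic1558/0luka | tools/ops/run_interpreter.py | _normalize_artifacts
-- ===== SOURCE A (Python) =====
-- from typing import Any
--
-- EXPECTED_ARTIFACT_TYPES = ("proof_pack", "ledger_proof_export")
--
-- def _artifact_id_for(run_id: str, artifact_type: str) -> str:
--     return f"{artifact_type}:{run_id}"
--
-- def _normalize_artifacts(run_id: str, artifacts: Any) -> tuple[list[str], bool] | None:
--     if not isinstance(artifacts, list):
--         return None
--
--     valid: list[str] = []
--     seen: set[str] = set()
--     inconsistent = False
--     expected_set = {_artifact_id_for(run_id, artifact_type) for artifact_type in EXPECTED_ARTIFACT_TYPES}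
--
--     for item in artifacts:
--         if not isinstance(item, str) or not item.strip():
--             return None
--         artifact_id = item.strip()
--         if artifact_id in seen:
--             inconsistent = True
--             continue
--         seen.add(artifact_id)
--         if artifact_id not in expected_set:
--             inconsistent = True
--             continue
--         valid.append(artifact_id)
--
--     return sorted(valid), inconsistent
-- ===== SOURCE B (Python) =====
-- from typing import Any
--
-- EXPECTED_ARTIFACT_TYPES = ("proof_pack", "ledger_proof_export")
--
-- def _artifact_id_for(run_id: str, artifact_type: str) -> str:
--     return f"{artifact_type}:{run_id}"
--
-- def _normalize_artifacts(run_id: str, artifacts: Any) -> tuple[list[str], bool] | None: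
--     if not isinstance(artifacts, list):
--         return None
--     stripped: list[str] = []
--     for item in artifacts:
--         if not isinstance(item, str) or not item.strip():
--             return None
--         stripped.append(item.strip())
--     expected = {_artifact_id_for(run_id, t) for t in EXPECTED_ARTIFACT_TYPES}
--     unique = set(stripped)
--     inconsistent = len(unique) != len(stripped) or any(s not in expected for s in unique)
--     return sorted(s for s in unique if s in expected), inconsistent
-- ===== Notes on version B (the rewrite author's own statement) =====
-- stated objective: simpler
-- what changed: A's single interleaved loop (seen-set dedup + expected-membership test + conditional append, with inconsistent flipped inside the loop) is replaced by a validation pass that only strips and rejects blanks, followed by a set-based derivation: dedup via set(stripped) with a length comparison detecting duplicates, an any() over the unique set for unexpected ids, and a sorted filter of the unique set for the result.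
import Mathlib
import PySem

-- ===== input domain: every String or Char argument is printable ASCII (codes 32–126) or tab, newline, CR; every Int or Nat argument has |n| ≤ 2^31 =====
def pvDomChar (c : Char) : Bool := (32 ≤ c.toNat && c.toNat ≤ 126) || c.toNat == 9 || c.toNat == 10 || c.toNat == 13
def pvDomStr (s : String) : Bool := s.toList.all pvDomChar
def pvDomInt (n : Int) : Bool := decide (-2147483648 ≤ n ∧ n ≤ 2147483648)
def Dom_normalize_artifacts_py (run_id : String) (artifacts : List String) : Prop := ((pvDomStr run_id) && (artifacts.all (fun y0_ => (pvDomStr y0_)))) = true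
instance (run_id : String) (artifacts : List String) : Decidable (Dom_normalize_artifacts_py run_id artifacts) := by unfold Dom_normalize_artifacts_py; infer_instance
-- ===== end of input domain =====

-- B replaces A's interleaved seen-set/membership/append loop by a validation pass followed by a
-- set-based derivation (dedup by set size, filter of the unique set); objective: simpler decomposition.

-- ===== PORT A =====
-- helper _artifact_id_for: f"{artifact_type}:{run_id}"
def pvArtifactIdFor (run_id : String) (artifact_type : String) : String :=
  String.ofList (artifact_type.toList ++ ':' :: run_id.toList)

-- expected_set = {_artifact_id_for(run_id, t) for t in EXPECTED_ARTIFACT_TYPES}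
def pvExpectedSet (run_id : String) : PySem.Set String :=
  PySem.Set.ofList (["proof_pack", "ledger_proof_export"].map (pvArtifactIdFor run_id))

-- the for-loop of A, with the trailing 'return sorted(valid), inconsistent' at the end of the list
def pvLoopA (expected : PySem.Set String) :
    List String → List String → PySem.Set String → Bool → Option (List String × Bool)
  | [], valid, _, inconsistent =>
      some (PySem.List.sorted valid (fun x => x) false, inconsistent)
  | item :: rest, valid, seen, inconsistent =>
      if PySem.Str.strip item = "" then none
      else
        let artifact_id := PySem.Str.strip item
        if PySem.Set.contains seen artifact_id then
          pvLoopA expected rest valid seen true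
        else
          let seen' := PySem.Set.add seen artifact_id
          if PySem.Set.contains expected artifact_id then
            pvLoopA expected rest (valid ++ [artifact_id]) seen' inconsistent
          else
            pvLoopA expected rest valid seen' true

def normalize_artifacts_py (run_id : String) (artifacts : List String) :
    Option (List String × Bool) :=
  pvLoopA (pvExpectedSet run_id) artifacts [] PySem.Set.empty false

-- ===== PORT B =====
-- validation pass: None on any blank item, else the list of stripped ids in order
def pvValidate : List String → Option (List String)
  | [] => some []
  | item :: rest =>
      if PySem.Str.strip item = "" then none
      else (pvValidate rest).map (fun l => PySem.Str.strip item :: l)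

def normalize_artifacts_py_alt (run_id : String) (artifacts : List String) :
    Option (List String × Bool) :=
  match pvValidate artifacts with
  | none => none
  | some stripped =>
      let expected := pvExpectedSet run_id
      let unique := PySem.Set.ofList stripped
      let inconsistent :=
        decide (PySem.Set.len unique ≠ stripped.length)
          || unique.any (fun s => ! PySem.Set.contains expected s)
      some (PySem.List.sorted (unique.filter (fun s => PySem.Set.contains expected s))
              (fun x => x) false,
            inconsistent)

-- ===== PRECONDITION & SPEC =====
def Spec_normalize_artifacts_py (run_id : String) (artifacts : List String) (out : Option (List String × Bool)) : Prop := out = normalize_artifacts_py_alt run_id artifacts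
instance (run_id : String) (artifacts : List String) (out : Option (List String × Bool)) : Decidable (Spec_normalize_artifacts_py run_id artifacts out) := by unfold Spec_normalize_artifacts_py; infer_instance

-- ===== CLAIM (what is proved, stated in full; the proofs are below) =====
def Claim_equal_normalize_artifacts_py : Prop := ∀ (run_id : String) (artifacts : List String), Dom_normalize_artifacts_py run_id artifacts → Spec_normalize_artifacts_py run_id artifacts (normalize_artifacts_py run_id artifacts)


-- ===== LEMMAS AND PROOFS =====

-- proof-side: the new first occurrences of l relative to seen, in order
def pvE (seen : List String) : List String → List String
  | [] => []
  | a :: l => if a ∈ seen then pvE seen l else a :: pvE (seen ++ [a]) l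

-- proof-side: what A's loop adds to valid, and whether it flips inconsistent
def pvG (p : String → Bool) (seen : List String) : List String → List String × Bool
  | [] => ([], false)
  | a :: l =>
      if a ∈ seen then ((pvG p seen l).1, true)
      else if p a then
        (a :: (pvG p (seen ++ [a]) l).1, (pvG p (seen ++ [a]) l).2)
      else ((pvG p (seen ++ [a]) l).1, true)

lemma pvSet_add_of_not_mem (s : List String) (x : String) (h : x ∉ s) :
    PySem.Set.add s x = s ++ [x] := by simp [PySem.Set.add, h]

lemma pvLoopA_eq (expected : PySem.Set String) :
    ∀ (items : List String) (valid : List String) (seen : PySem.Set String) (inc : Bool),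
      pvLoopA expected items valid seen inc =
        (pvValidate items).map (fun stripped =>
          (PySem.List.sorted (valid ++ (pvG (PySem.Set.contains expected) seen stripped).1)
             (fun x => x) false,
           inc || (pvG (PySem.Set.contains expected) seen stripped).2)) := by
  intro items
  induction items with
  | nil => intro valid seen inc; simp [pvLoopA, pvValidate, pvG]
  | cons item rest ih =>
      intro valid seen inc
      by_cases hs : PySem.Str.strip item = ""
      · simp [pvLoopA, pvValidate, hs]
      · rcases hv : pvValidate rest with _ | stripped
        · by_cases hseen : PySem.Str.strip item ∈ seen
          · simp [pvLoopA, pvValidate, hs, hv, hseen, ih]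
          · by_cases hp : PySem.Str.strip item ∈ expected <;>
              simp [pvLoopA, pvValidate, hs, hv, hseen, hp, ih]
        · by_cases hseen : PySem.Str.strip item ∈ seen
          · simp [pvLoopA, pvValidate, hs, hv, hseen, ih, pvG]
          · by_cases hp : PySem.Str.strip item ∈ expected
            · simp [pvLoopA, pvValidate, hs, hv, hseen, hp, ih, pvG]
            · simp [pvLoopA, pvValidate, hs, hv, hseen, hp, ih, pvG]

lemma pvG_fst (p : String → Bool) :
    ∀ (l : List String) (seen : List String),
      (pvG p seen l).1 = (pvE seen l).filter p := by
  intro l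
  induction l with
  | nil => intro seen; simp [pvG, pvE]
  | cons a l ih =>
      intro seen
      by_cases h : a ∈ seen
      · simp [pvG, pvE, h, ih]
      · by_cases hp : p a <;> simp [pvG, pvE, h, hp, ih]

lemma pvE_update :
    ∀ (l : List String) (seen : PySem.Set String),
      PySem.Set.update seen l = seen ++ pvE seen l := by
  intro l
  induction l with
  | nil => intro seen; simp [PySem.Set.update, pvE]
  | cons a l ih =>
      intro seen
      by_cases h : a ∈ seen
      · have hadd : PySem.Set.add seen a = seen := by simp [PySem.Set.add, h]
        calc PySem.Set.update seen (a :: l)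
            = PySem.Set.update seen l := by simp [PySem.Set.update, hadd]
          _ = seen ++ pvE seen (a :: l) := by rw [ih seen]; simp [pvE, h]
      · calc PySem.Set.update seen (a :: l)
            = PySem.Set.update (seen ++ [a]) l := by
              simp [PySem.Set.update, pvSet_add_of_not_mem seen a h]
          _ = seen ++ [a] ++ pvE (seen ++ [a]) l := ih _
          _ = seen ++ pvE seen (a :: l) := by simp [pvE, h]

lemma pvOfList_eq_pvE (l : List String) : PySem.Set.ofList l = pvE [] l := by
  have h := pvE_update l []
  have h0 : PySem.Set.ofList l = PySem.Set.update [] l := by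
    simp [PySem.Set.ofList, PySem.Set.update]
  simpa [h0] using h

lemma pvG_snd (p : String → Bool) :
    ∀ (l : List String) (seen : List String), seen.Nodup →
      (pvG p seen l).2 = (decide (¬ (seen ++ l).Nodup) || l.any (fun a => ! p a)) := by
  intro l
  induction l with
  | nil => intro seen hn; simp [pvG, hn]
  | cons a l ih =>
      intro seen hn
      by_cases h : a ∈ seen
      · have : ¬ (seen ++ a :: l).Nodup := by
          intro hnd
          exact List.disjoint_of_nodup_append hnd h List.mem_cons_self
        simp [pvG, h, this]
      · have hn' : (seen ++ [a]).Nodup := by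
          refine List.Nodup.append hn (by simp) ?_
          intro x hx hxa
          rw [List.mem_singleton] at hxa
          exact h (hxa ▸ hx)
        by_cases hp : p a
        · have hih := ih (seen ++ [a]) hn'
          simp only [pvG, h, ite_false, hp, if_pos]
          rw [hih, List.append_assoc]
          simp [hp]
        · have hany : (a :: l).any (fun a => ! p a) = true := by simp [hp]
          simp [pvG, h, hp, hany]

lemma pvE_length_le : ∀ (l : List String) (seen : List String),
    (pvE seen l).length ≤ l.length := by
  intro l
  induction l with
  | nil => intro seen; simp [pvE]
  | cons a l ih =>
      intro seen
      by_cases h : a ∈ seen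
      · simp only [pvE, h, if_pos, List.length_cons]
        exact Nat.le_succ_of_le (ih seen)
      · simp only [pvE, h, if_neg, not_false_iff, List.length_cons]
        exact Nat.succ_le_succ (ih _)

lemma pvE_length_eq_iff : ∀ (l : List String) (seen : List String), seen.Nodup →
    ((pvE seen l).length = l.length ↔ (seen ++ l).Nodup) := by
  intro l
  induction l with
  | nil => intro seen hn; simp [pvE, hn]
  | cons a l ih =>
      intro seen hn
      by_cases h : a ∈ seen
      · have h1 : (pvE seen (a :: l)).length ≤ l.length := by
          simpa [pvE, h] using pvE_length_le l seen
        have h2 : ¬ (seen ++ a :: l).Nodup := by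
          intro hnd
          exact List.disjoint_of_nodup_append hnd h List.mem_cons_self
        constructor
        · intro he
          rw [he] at h1
          simp at h1
        · intro hnd; exact absurd hnd h2
      · have hn' : (seen ++ [a]).Nodup := by
          refine List.Nodup.append hn (by simp) ?_
          intro x hx hxa
          rw [List.mem_singleton] at hxa
          exact h (hxa ▸ hx)
        have heq : pvE seen (a :: l) = a :: pvE (seen ++ [a]) l := by simp [pvE, h]
        rw [heq]
        simp only [List.length_cons, Nat.succ_inj]
        rw [ih (seen ++ [a]) hn', List.append_assoc]
        simp

lemma pvOfList_any (q : String → Bool) (l : List String) :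
    (PySem.Set.ofList l).any q = l.any q := by
  rw [Bool.eq_iff_iff]
  simp only [List.any_eq_true]
  constructor
  · rintro ⟨x, hx, hq⟩; exact ⟨x, (PySem.Set.mem_ofList l x).1 hx, hq⟩
  · rintro ⟨x, hx, hq⟩; exact ⟨x, (PySem.Set.mem_ofList l x).2 hx, hq⟩

lemma pvOfList_len (l : List String) :
    decide (PySem.Set.len (PySem.Set.ofList l) ≠ l.length) = decide (¬ l.Nodup) := by
  have hlen : PySem.Set.len (PySem.Set.ofList l) = ((pvE [] l).length : Int) := by
    simp [PySem.Set.len, pvOfList_eq_pvE]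
  have h := pvE_length_eq_iff l [] (by simp)
  simp only [List.nil_append] at h
  rw [decide_eq_decide, hlen, Ne, Int.natCast_inj]
  exact not_congr h

-- ===== VERDICT (by name: the statement is the Claim_ definition above) =====
theorem normalize_artifacts_py_spec : Claim_equal_normalize_artifacts_py := by
  intro run_id artifacts _
  unfold Spec_normalize_artifacts_py
  unfold normalize_artifacts_py normalize_artifacts_py_alt
  rw [pvLoopA_eq]
  rcases hv : pvValidate artifacts with _ | stripped
  · simp
  · have hempty : (PySem.Set.empty : PySem.Set String) = [] := rfl
    have h1 : (pvG (PySem.Set.contains (pvExpectedSet run_id)) [] stripped).1 =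
        (PySem.Set.ofList stripped).filter
          (fun s => PySem.Set.contains (pvExpectedSet run_id) s) := by
      rw [pvG_fst, pvOfList_eq_pvE]
    have h2 : (pvG (PySem.Set.contains (pvExpectedSet run_id)) [] stripped).2 =
        (decide (PySem.Set.len (PySem.Set.ofList stripped) ≠ stripped.length)
          || (PySem.Set.ofList stripped).any
               (fun s => ! PySem.Set.contains (pvExpectedSet run_id) s)) := by
      rw [pvG_snd _ _ [] (by simp), pvOfList_len, pvOfList_any]
      simp
    simp only [Option.map_some, hempty, h1, h2, List.nil_append, Bool.false_or]
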